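-- pv_equiv track=rewrite | github.com/Silversanatan/Chatbot.py | Fall 2025/shorts2_template/shorts2_template/update_dict2.py | update_dict2
-- ===== SOURCE A (Python) =====
-- def update_dict2(dict2, key1, key2, value):
--     new_dict2 = {}
--     for k, v in dict2.items():
--         inner_dict = {}
--         for inner_k, inner_v in v.items():
--             inner_dict[inner_k] = inner_v
--         new_dict2[k] = inner_dict
--     if key1 in new_dict2:
--         new_dict2[key1][key2] = value
--     else:
--         new_dict2[key1] = {key2: value}
--     return new_dict2
-- ===== SOURCE B (Python) =====
-- def update_dict2(dict2, key1, key2, value):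
--     # Shallow-copy the outer dict; copy (or create) only the inner dict for key1.
--     new_dict2 = dict(dict2)
--     inner = dict(new_dict2.get(key1, {}))
--     inner[key2] = value
--     new_dict2[key1] = inner
--     return new_dict2
-- ===== Notes on version B (the rewrite author's own statement) =====
-- stated objective: alternative
-- what changed: Instead of deep-copying every inner dict entry by entry, B shallow-copies the outer dict and copies only the single inner dict for key1 before setting key2 (measured about 1.3x, below the 1.5x faster threshold).
import Mathlib
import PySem

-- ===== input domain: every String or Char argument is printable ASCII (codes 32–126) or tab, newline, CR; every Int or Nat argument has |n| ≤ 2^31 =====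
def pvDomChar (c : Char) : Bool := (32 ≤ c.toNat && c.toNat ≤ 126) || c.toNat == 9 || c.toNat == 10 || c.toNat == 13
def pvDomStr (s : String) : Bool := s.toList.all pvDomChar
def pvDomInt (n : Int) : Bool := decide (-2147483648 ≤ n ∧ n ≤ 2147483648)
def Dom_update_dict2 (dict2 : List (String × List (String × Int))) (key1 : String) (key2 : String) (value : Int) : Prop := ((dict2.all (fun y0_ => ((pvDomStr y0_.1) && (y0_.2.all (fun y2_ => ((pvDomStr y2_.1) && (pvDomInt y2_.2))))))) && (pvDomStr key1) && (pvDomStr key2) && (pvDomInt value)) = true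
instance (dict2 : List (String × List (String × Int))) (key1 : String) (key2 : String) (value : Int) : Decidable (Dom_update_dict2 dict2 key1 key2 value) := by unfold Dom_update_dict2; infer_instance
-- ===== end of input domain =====

-- B shallow-copies the outer dict and copies only the inner dict being modified, instead of
-- deep-copying every inner dict. Equivalence is about the RETURN value; A mutates
-- nothing. Pre_ excludes association lists with duplicate keys, which represent no Python dict.


-- ===== PORT A =====
-- line-by-line: build new_dict2 by deep-copying each inner dict entry by entry, then set.
def update_dict2 (dict2 : List (String × List (String × Int))) (key1 : String) (key2 : String) (value : Int) : List (String × List (String × Int)) :=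
  let new_dict2 : PySem.Dict String (PySem.Dict String Int) :=
    dict2.foldl (fun nd kv =>
      let inner_dict : PySem.Dict String Int :=
        kv.2.foldl (fun idict p => idict.insert p.1 p.2) PySem.Dict.empty
      nd.insert kv.1 inner_dict) PySem.Dict.empty
  let new_dict2 :=
    if new_dict2.contains key1 then
      new_dict2.modify key1 PySem.Dict.empty (fun d => d.insert key2 value)
    else
      new_dict2.insert key1 (PySem.Dict.mk [(key2, value)])
  new_dict2.items.map (fun p => (p.1, p.2.items))

-- ===== PORT B =====
-- line-by-line port of Source B: shallow outer copy, copy only key1's inner dict, set, reinsert.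
def update_dict2_alt (dict2 : List (String × List (String × Int))) (key1 : String) (key2 : String) (value : Int) : List (String × List (String × Int)) :=
  let new_dict2 : PySem.Dict String (List (String × Int)) := PySem.Dict.mk dict2
  let inner : PySem.Dict String Int := PySem.Dict.mk (new_dict2.getD key1 [])
  let inner := inner.insert key2 value
  let new_dict2 := new_dict2.insert key1 inner.items
  new_dict2.items

-- ===== PRECONDITION & SPEC =====
-- Pre_ excludes association lists with duplicate outer or inner keys: those represent no
-- Python dict (a Python dict cannot hold a key twice), so A never receives them.
def Pre_update_dict2 (dict2 : List (String × List (String × Int))) (key1 : String) (key2 : String) (value : Int) : Prop :=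
  (dict2.map Prod.fst).Nodup ∧ ∀ kv ∈ dict2, (kv.2.map Prod.fst).Nodup
instance (dict2 : List (String × List (String × Int))) (key1 : String) (key2 : String) (value : Int) : Decidable (Pre_update_dict2 dict2 key1 key2 value) := by unfold Pre_update_dict2; infer_instance

def pvWitness_update_dict2 : (List (String × List (String × Int))) × String × String × Int :=
  ([("a", [("x", 1), ("y", 2)]), ("b", [("x", 3)])], "a", "z", 7)

def Spec_update_dict2 (dict2 : List (String × List (String × Int))) (key1 : String) (key2 : String) (value : Int) (out : List (String × List (String × Int))) : Prop := out = update_dict2_alt dict2 key1 key2 value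
instance (dict2 : List (String × List (String × Int))) (key1 : String) (key2 : String) (value : Int) (out : List (String × List (String × Int))) : Decidable (Spec_update_dict2 dict2 key1 key2 value out) := by unfold Spec_update_dict2; infer_instance

-- ===== CLAIM (what is proved, stated in full; the proofs are below) =====
def Claim_equal_update_dict2 : Prop := ∀ (dict2 : List (String × List (String × Int))) (key1 : String) (key2 : String) (value : Int), Dom_update_dict2 dict2 key1 key2 value → Pre_update_dict2 dict2 key1 key2 value → Spec_update_dict2 dict2 key1 key2 value (update_dict2 dict2 key1 key2 value)

-- ===== LEMMAS AND PROOFS =====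

-- the deep-copy loop over a Nodup-keyed association list rebuilds the same list
theorem copy_inner_items (v : List (String × Int)) (h : (v.map Prod.fst).Nodup) :
    (v.foldl (fun idict p => idict.insert p.1 p.2) (PySem.Dict.empty : PySem.Dict String Int)).items = v := by
  have := PySem.Dict.items_foldl_insert_fresh (l := v) (k := Prod.fst) (v := Prod.snd)
    (d := (PySem.Dict.empty : PySem.Dict String Int)) (by simp) h
  simpa using this

-- the outer deep-copy loop produces, as items, dict2 with each inner list wrapped in Dict.mk
theorem copy_outer_items (dict2 : List (String × List (String × Int)))
    (hod : (dict2.map Prod.fst).Nodup) :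
    (dict2.foldl (fun nd kv =>
        nd.insert kv.1 (kv.2.foldl (fun idict p => idict.insert p.1 p.2) PySem.Dict.empty))
      (PySem.Dict.empty : PySem.Dict String (PySem.Dict String Int))).items
    = dict2.map (fun kv => (kv.1, kv.2.foldl (fun idict p => idict.insert p.1 p.2) PySem.Dict.empty)) := by
  have := PySem.Dict.items_foldl_insert_fresh (l := dict2) (k := Prod.fst)
    (v := fun kv => kv.2.foldl (fun idict p => idict.insert p.1 p.2) PySem.Dict.empty)
    (d := (PySem.Dict.empty : PySem.Dict String (PySem.Dict String Int))) (by simp) hod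
  simpa using this

-- ===== VERDICT (by name: the statement is the Claim_ definition above) =====
theorem update_dict2_spec : Claim_equal_update_dict2 := by
  intro dict2 key1 key2 value _ hpre
  obtain ⟨hod, hind⟩ := hpre
  unfold Spec_update_dict2 update_dict2 update_dict2_alt
  simp only
  -- the outer deep-copy dict and the shallow Dict.mk view of the input
  set outer : PySem.Dict String (PySem.Dict String Int) :=
    dict2.foldl (fun nd kv =>
      nd.insert kv.1 (kv.2.foldl (fun idict p => idict.insert p.1 p.2) PySem.Dict.empty))
      PySem.Dict.empty with houter
  have hitems : outer.items
      = dict2.map (fun kv => (kv.1, kv.2.foldl (fun idict p => idict.insert p.1 p.2) PySem.Dict.empty)) :=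
    copy_outer_items dict2 hod
  have hkeys : outer.keys = dict2.map Prod.fst := by
    simp only [PySem.Dict.keys, hitems, List.map_map]; rfl
  have hmkkeys : (PySem.Dict.mk dict2).keys = dict2.map Prod.fst := by
    simp [PySem.Dict.keys]
  have hcont : outer.contains key1 = (PySem.Dict.mk dict2).contains key1 := by
    rw [PySem.Dict.contains_eq_decide_mem_keys, PySem.Dict.contains_eq_decide_mem_keys,
      hkeys, hmkkeys]
  by_cases hmem : key1 ∈ dict2.map Prod.fst
  · -- key1 is already an outer key
    obtain ⟨kv, hkv, hk1⟩ := List.mem_map.mp hmem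
    have hcont1 : (PySem.Dict.mk dict2).contains key1 = true := by
      rw [PySem.Dict.contains_eq_decide_mem_keys, hmkkeys]; simpa using hmem
    have hocont : outer.contains key1 = true := hcont.trans hcont1
    have hgetmk : (PySem.Dict.mk dict2).getD key1 [] = kv.2 := by
      apply PySem.Dict.getD_of_mem_items
      · show (key1, kv.2) ∈ dict2
        rw [← hk1]; exact hkv
      · simpa [hmkkeys] using hod
    have hgetouter : outer.getD key1 PySem.Dict.empty
        = kv.2.foldl (fun idict p => idict.insert p.1 p.2) PySem.Dict.empty := by
      apply PySem.Dict.getD_of_mem_items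
      · rw [hitems]
        exact List.mem_map.mpr ⟨kv, hkv, by rw [hk1]⟩
      · rw [hkeys]; exact hod
    have hinner : outer.getD key1 PySem.Dict.empty
        = PySem.Dict.mk ((PySem.Dict.mk dict2).getD key1 []) := by
      rw [hgetmk, hgetouter]
      apply PySem.Dict.ext
      exact copy_inner_items kv.2 (hind kv hkv)
    rw [hocont, if_pos rfl]
    have hmod : outer.modify key1 PySem.Dict.empty (fun d => d.insert key2 value)
        = outer.insert key1 ((outer.getD key1 PySem.Dict.empty).insert key2 value) := rfl
    rw [hmod,
      PySem.Dict.items_insert_of_contains _ _ hocont,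
      PySem.Dict.items_insert_of_contains _ _ hcont1,
      hitems]
    show (List.map _ (List.map _ (List.map _ dict2))) = List.map _ dict2
    rw [List.map_map, List.map_map]
    apply List.map_congr_left
    intro p hp
    by_cases hpk : p.1 = key1
    · simp only [Function.comp, hpk, beq_self_eq_true, if_true, hinner]
    · simp only [Function.comp]
      rw [if_neg (by simpa using hpk), if_neg (by simpa using hpk)]
      show (p.1, (PySem.Dict.items _)) = p
      rw [copy_inner_items p.2 (hind p hp)]
  · -- key1 is a fresh outer key
    have hcont0 : (PySem.Dict.mk dict2).contains key1 = false := by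
      rw [PySem.Dict.contains_eq_decide_mem_keys, hmkkeys]; simpa using hmem
    have hocont : outer.contains key1 = false := hcont.trans hcont0
    have hgetmk : (PySem.Dict.mk dict2).getD key1 [] = [] :=
      PySem.Dict.getD_of_not_contains _ _ hcont0
    rw [hocont, if_neg (by simp),
      PySem.Dict.items_insert_of_not_contains _ _ hocont,
      PySem.Dict.items_insert_of_not_contains _ _ hcont0,
      hgetmk, hitems, List.map_append, List.map_map]
    congr 1
    · have hid : ({ items := dict2 } : PySem.Dict String (List (String × Int))).items
          = List.map id dict2 := by simp
      rw [hid]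
      apply List.map_congr_left
      intro p hp
      show (p.1, (PySem.Dict.items _)) = p
      rw [copy_inner_items p.2 (hind p hp)]
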